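-- pv_equiv track=rewrite | github.com/bumstone/gitdeun-AI | services/suggestion_service.py | _auto_choose_path
-- ===== SOURCE A (Python) =====
-- from typing import List, Tuple, Dict, Optional, Literal, Any
--
-- def _auto_choose_path(candidates: List[str]) -> Optional[str]:
--     if not candidates:
--         return None
--     for p in candidates:
--         if "src/main" in p and "/test/" not in p:
--             return p
--     for p in candidates:
--         if "src/main" in p:
--             return p
--     for p in candidates:
--         if "/test/" not in p:
--             return p
--     return candidates[0]
-- ===== SOURCE B (Python) =====
-- def _auto_choose_path(candidates):
--     if not candidates:
--         return None
--
--     def rank(p):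
--         if "src/main" in p and "/test/" not in p:
--             return 0
--         if "src/main" in p:
--             return 1
--         if "/test/" not in p:
--             return 2
--         return 3
--
--     best, best_rank = candidates[0], rank(candidates[0])
--     for p in candidates[1:]:
--         r = rank(p)
--         if r < best_rank:
--             best, best_rank = p, r
--     return best
-- ===== Notes on version B (the rewrite author's own statement) =====
-- stated objective: alternative
-- what changed: Replaced A's three sequential scans (one per priority tier) by a single pass that ranks each path 0-3 and keeps the earliest path of minimal rank (stable running minimum).
import Mathlib
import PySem

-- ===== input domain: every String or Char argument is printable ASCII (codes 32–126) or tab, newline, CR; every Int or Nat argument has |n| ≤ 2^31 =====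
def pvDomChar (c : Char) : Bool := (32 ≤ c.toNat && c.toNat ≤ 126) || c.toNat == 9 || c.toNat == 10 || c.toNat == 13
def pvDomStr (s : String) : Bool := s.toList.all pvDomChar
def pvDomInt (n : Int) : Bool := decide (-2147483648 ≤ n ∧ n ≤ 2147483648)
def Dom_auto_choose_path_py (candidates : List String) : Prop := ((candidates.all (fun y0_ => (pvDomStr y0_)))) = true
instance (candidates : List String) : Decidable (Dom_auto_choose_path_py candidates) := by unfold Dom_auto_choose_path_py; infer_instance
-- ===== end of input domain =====

-- B replaces A's three sequential tier scans by one pass keeping the earliest path of minimal rank (objective: alternative, same cost).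

-- ===== PORT A =====
-- each 'for p in candidates: if cond: return p' loop is the first match, i.e. List.find?
def auto_choose_path_py (candidates : List String) : Option String :=
  if candidates.isEmpty then none
  else
    match candidates.find? (fun p => PySem.Str.isIn "src/main" p && !PySem.Str.isIn "/test/" p) with
    | some p => some p
    | none =>
      match candidates.find? (fun p => PySem.Str.isIn "src/main" p) with
      | some p => some p
      | none =>
        match candidates.find? (fun p => !PySem.Str.isIn "/test/" p) with
        | some p => some p
        | none => PySem.List.pyGet? candidates 0

-- ===== PORT B =====
def pvRank (p : String) : Nat :=
  if PySem.Str.isIn "src/main" p && !PySem.Str.isIn "/test/" p then 0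
  else if PySem.Str.isIn "src/main" p then 1
  else if !PySem.Str.isIn "/test/" p then 2
  else 3

def auto_choose_path_py_alt (candidates : List String) : Option String :=
  match candidates with
  | [] => none
  | h :: t =>
    some ((t.foldl (fun b p => if pvRank p < b.2 then (p, pvRank p) else b) (h, pvRank h)).1)

-- ===== PRECONDITION & SPEC =====
def Spec_auto_choose_path_py (candidates : List String) (out : Option String) : Prop := out = auto_choose_path_py_alt candidates
instance (candidates : List String) (out : Option String) : Decidable (Spec_auto_choose_path_py candidates out) := by unfold Spec_auto_choose_path_py; infer_instance

-- ===== CLAIM (what is proved, stated in full; the proofs are below) =====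
def Claim_equal_auto_choose_path_py : Prop := ∀ (candidates : List String), Dom_auto_choose_path_py candidates → Spec_auto_choose_path_py candidates (auto_choose_path_py candidates)

-- ===== LEMMAS AND PROOFS =====

theorem pv_pyGet0 (x : String) (l : List String) : PySem.List.pyGet? (x :: l) 0 = some x := by
  simp [PySem.List.pyGet?, PySem.List.pyIdx?]

-- merging the head pair by rank does not change A's choice
theorem pv_bridge (h p : String) (rest : List String) :
    auto_choose_path_py ((if pvRank p < pvRank h then p else h) :: rest)
      = auto_choose_path_py (h :: p :: rest) := by
  by_cases sh : PySem.Str.isIn "src/main" h = true <;>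
  by_cases th : PySem.Str.isIn "/test/" h = true <;>
  by_cases sp : PySem.Str.isIn "src/main" p = true <;>
  by_cases tp : PySem.Str.isIn "/test/" p = true <;>
    simp only [auto_choose_path_py, pvRank, List.find?_cons, List.isEmpty_cons,
      sh, th, sp, tp, eq_self_iff_true, Bool.not_true, Bool.not_false,
      Bool.true_and, Bool.false_and, Bool.and_true, Bool.and_false,
      Bool.not_eq_true, Bool.not_eq_false, if_true, if_false, ite_true, ite_false,
      Nat.lt_irrefl, decide_true, decide_false] <;>
    simp_all [pv_pyGet0]

theorem pv_fold_eq (t : List String) : ∀ (h : String),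
    some ((t.foldl (fun b p => if pvRank p < b.2 then (p, pvRank p) else b) (h, pvRank h)).1)
      = auto_choose_path_py (h :: t) := by
  induction t with
  | nil =>
    intro h
    by_cases sh : PySem.Str.isIn "src/main" h = true <;>
    by_cases th : PySem.Str.isIn "/test/" h = true <;>
      simp only [auto_choose_path_py, List.find?_cons, List.find?_nil, List.isEmpty_cons,
        sh, th, Bool.not_true, Bool.not_false, Bool.true_and, Bool.false_and,
        ite_true, ite_false] <;>
      simp_all [pv_pyGet0]
  | cons p rest ih =>
    intro h
    rw [← pv_bridge h p rest, ← ih (if pvRank p < pvRank h then p else h)]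
    by_cases hlt : pvRank p < pvRank h <;>
      simp [List.foldl_cons, hlt]

-- ===== VERDICT (by name: the statement is the Claim_ definition above) =====
theorem auto_choose_path_py_spec : Claim_equal_auto_choose_path_py := by
  intro candidates _
  unfold Spec_auto_choose_path_py auto_choose_path_py_alt
  cases candidates with
  | nil => simp [auto_choose_path_py]
  | cons h t => exact (pv_fold_eq t h).symm
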